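-- pv_equiv track=rewrite | github.com/shinyswellow/elevens-lean | python/exact.py | _enumerate_draws
-- ===== SOURCE A (Python) =====
-- def _enumerate_draws(pile: tuple[int, ...], k: int):
--     """
--     Yield all tuples draw such that:
--     - 0 <= draw[r] <= pile[r] for each r
--     - sum(draw) == k
--
--     Uses recursive enumeration over ranks.
--     """
--     n = len(pile)
--
--     def _recurse(r: int, remaining: int, current: list[int]):
--         if r == n:
--             if remaining == 0:
--                 yield tuple(current)
--             return
--         lo = max(0, remaining - sum(pile[r + 1:]))
--         hi = min(pile[r], remaining)
--         for d in range(lo, hi + 1):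
--             current.append(d)
--             yield from _recurse(r + 1, remaining - d, current)
--             current.pop()
--
--     yield from _recurse(0, k, [])
-- ===== SOURCE B (Python) =====
-- def _enumerate_draws(pile: tuple[int, ...], k: int):
--     """Breadth-first re-implementation: precompute suffix sums once, then
--     expand the set of (prefix, remaining) states rank by rank."""
--     n = len(pile)
--     suffix = [0]
--     for x in reversed(pile):
--         suffix.append(suffix[-1] + x)
--     suffix.reverse()
--     states = [((), k)]
--     for r in range(n):
--         states = [
--             (pre + (d,), rem - d)
--             for pre, rem in states
--             for d in range(max(0, rem - suffix[r + 1]), min(pile[r], rem) + 1)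
--         ]
--     for pre, rem in states:
--         if rem == 0:
--             yield pre
-- ===== Notes on version B (the rewrite author's own statement) =====
-- stated objective: alternative
-- what changed: Replaced the depth-first recursive generator that re-sums pile[r+1:] at every search node by a breadth-first rank-by-rank expansion of (prefix, remaining) states over a once-precomputed suffix-sum table; it trades recursion depth for holding each level of states in memory.
import Mathlib
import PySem

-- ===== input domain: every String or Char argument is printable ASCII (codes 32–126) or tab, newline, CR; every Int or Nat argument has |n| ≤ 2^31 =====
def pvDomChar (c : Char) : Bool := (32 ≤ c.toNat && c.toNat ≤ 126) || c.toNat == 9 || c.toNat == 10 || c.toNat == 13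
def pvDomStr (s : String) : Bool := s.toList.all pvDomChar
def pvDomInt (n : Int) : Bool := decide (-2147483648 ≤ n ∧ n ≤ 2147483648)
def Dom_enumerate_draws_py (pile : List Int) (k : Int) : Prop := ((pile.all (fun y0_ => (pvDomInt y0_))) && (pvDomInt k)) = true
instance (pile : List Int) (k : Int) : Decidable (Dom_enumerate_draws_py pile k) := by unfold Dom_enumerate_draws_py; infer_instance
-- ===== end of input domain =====

-- B replaces A's depth-first recursion over ranks by a breadth-first rank-by-rank
-- expansion of (prefix, remaining) states over precomputed suffix sums (alternative
-- algorithm, same results in the same order).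

-- ===== PORT A =====
-- A's inner generator _recurse(r, remaining, current); the `yield`s are collected
-- in document order into a list. r ≤ n always holds on A's calls; recursion is on n - r.
def pvArec (pile : List Int) (n : Nat) (r : Nat) (remaining : Int) (current : List Int) :
    List (List Int) :=
  if _h : r < n then
    let lo := max 0 (remaining - (PySem.List.slice pile (some ((r : Int) + 1)) none).sum)
    let hi := min (PySem.List.pyGetD pile (r : Int) 0) remaining
    (PySem.List.pyRange lo (hi + 1) 1).foldl
      (fun acc d => acc ++ pvArec pile n (r + 1) (remaining - d) (current ++ [d])) []
  else
    if remaining = 0 then [current] else []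
termination_by n - r

def enumerate_draws_py (pile : List Int) (k : Int) : List (List Int) :=
  pvArec pile pile.length 0 k []

-- ===== PORT B =====
def enumerate_draws_py_alt (pile : List Int) (k : Int) : List (List Int) :=
  let n := pile.length
  let suffix : List Int :=
    (pile.reverse.foldl (fun acc x => acc ++ [PySem.List.pyGetD acc (-1) 0 + x]) [0]).reverse
  let states : List (List Int × Int) :=
    (PySem.List.pyRange 0 (n : Int) 1).foldl
      (fun states r =>
        states.flatMap (fun s =>
          (PySem.List.pyRange (max 0 (s.2 - PySem.List.pyGetD suffix (r + 1) 0))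
              (min (PySem.List.pyGetD pile r 0) s.2 + 1) 1).map
            (fun d => (s.1 ++ [d], s.2 - d))))
      [(([] : List Int), k)]
  states.filterMap (fun s => if s.2 = 0 then some s.1 else none)

-- ===== PRECONDITION & SPEC =====
def Spec_enumerate_draws_py (pile : List Int) (k : Int) (out : List (List Int)) : Prop := out = enumerate_draws_py_alt pile k
instance (pile : List Int) (k : Int) (out : List (List Int)) : Decidable (Spec_enumerate_draws_py pile k out) := by unfold Spec_enumerate_draws_py; infer_instance

-- ===== CLAIM (what is proved, stated in full; the proofs are below) =====
def Claim_equal_enumerate_draws_py : Prop := ∀ (pile : List Int) (k : Int), Dom_enumerate_draws_py pile k → Spec_enumerate_draws_py pile k (enumerate_draws_py pile k)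

-- ===== LEMMAS AND PROOFS =====

-- running partial sums with seed s : the values B's suffix loop appends to acc
def pvRuns (s : Int) : List Int → List Int
  | [] => []
  | x :: xs => (s + x) :: pvRuns (s + x) xs

theorem pvRuns_append (s : Int) (l1 l2 : List Int) :
    pvRuns s (l1 ++ l2) = pvRuns s l1 ++ pvRuns (s + l1.sum) l2 := by
  induction l1 generalizing s with
  | nil => simp [pvRuns]
  | cons x xs ih => simp [pvRuns, ih, add_assoc]

theorem pvB_foldl_runs (l : List Int) (acc : List Int) (s : Int)
    (hs : PySem.List.pyGetD acc (-1) 0 = s) :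
    l.foldl (fun acc x => acc ++ [PySem.List.pyGetD acc (-1) 0 + x]) acc
      = acc ++ pvRuns s l := by
  induction l generalizing acc s with
  | nil => simp [pvRuns]
  | cons x xs ih =>
    simp only [List.foldl_cons, pvRuns, hs]
    rw [ih (acc ++ [s + x]) (s + x) (by simp [PySem.List.pyGetD_neg_one_append_singleton])]
    simp

-- B's suffix list is exactly the list of suffix sums of pile
theorem pv_suffix_eq (pile : List Int) :
    (pile.reverse.foldl (fun acc x => acc ++ [PySem.List.pyGetD acc (-1) 0 + x]) [0]).reverse
      = (List.range (pile.length + 1)).map (fun i => (pile.drop i).sum) := by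
  rw [pvB_foldl_runs pile.reverse [0] 0 (by decide)]
  induction pile with
  | nil => simp [pvRuns]
  | cons x xs ih =>
    rw [List.reverse_cons, pvRuns_append]
    simp only [pvRuns, List.sum_reverse, zero_add]
    rw [show (x :: xs).length + 1 = (xs.length + 1) + 1 from rfl, List.range_succ_eq_map]
    simp only [List.map_cons, List.drop_zero, List.map_map]
    rw [show ((fun i => ((x :: xs).drop i).sum) ∘ Nat.succ)
          = (fun i => (xs.drop i).sum) from funext fun i => rfl]
    rw [← ih]
    simp [List.sum_cons]
    ring

theorem pv_suffix_getD (pile : List Int) (i : Nat) (hi : i ≤ pile.length) :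
    PySem.List.pyGetD
      ((pile.reverse.foldl (fun acc x => acc ++ [PySem.List.pyGetD acc (-1) 0 + x]) [0]).reverse)
      (i : Int) 0 = (pile.drop i).sum := by
  rw [pv_suffix_eq, PySem.List.pyGetD_natCast, List.getD_eq_getElem?_getD,
    List.getElem?_map, List.getElem?_range (by omega)]
  rfl

-- the level-by-level expansion from rank r, then keeping exhausted states,
-- equals flat-mapping A's depth-first recursion from rank r over the states
theorem pv_main (pile : List Int) (r : Nat) (hr : r ≤ pile.length)
    (states : List (List Int × Int)) :
    ((PySem.List.pyRange (r : Int) (pile.length : Int) 1).foldl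
      (fun states rr =>
        states.flatMap (fun s =>
          (PySem.List.pyRange (max 0 (s.2 - PySem.List.pyGetD
              ((pile.reverse.foldl (fun acc x => acc ++ [PySem.List.pyGetD acc (-1) 0 + x]) [0]).reverse)
              (rr + 1) 0))
              (min (PySem.List.pyGetD pile rr 0) s.2 + 1) 1).map
            (fun d => (s.1 ++ [d], s.2 - d))))
      states).filterMap (fun s => if s.2 = 0 then some s.1 else none)
      = states.flatMap (fun s => pvArec pile pile.length r s.2 s.1) := by
  induction hj : pile.length - r generalizing r states with
  | zero =>
    have hrn : r = pile.length := by omega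
    subst hrn
    rw [PySem.List.pyRange_one_eq_nil (by omega), List.foldl_nil,
      List.filterMap_eq_flatMap_toList]
    apply List.flatMap_congr
    intro s _
    rw [pvArec]
    simp only [dif_neg (lt_irrefl pile.length)]
    split <;> rfl
  | succ j ih =>
    have hrn : r < pile.length := by omega
    rw [PySem.List.pyRange_one_cons (by exact_mod_cast hrn), List.foldl_cons,
      show ((r : Int) + 1) = ((r + 1 : Nat) : Int) by push_cast; ring,
      ih (r + 1) (by omega) _ (by omega), List.flatMap_assoc]
    apply List.flatMap_congr
    intro s _
    rw [List.flatMap_map, pvArec]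
    rw [dif_pos hrn]
    rw [show ((r : Int) + 1) = ((r + 1 : Nat) : Int) by push_cast; ring,
      PySem.List.slice_from_natCast,
      PySem.List.foldl_append_eq_flatMap, List.nil_append,
      pv_suffix_getD pile (r + 1) (by omega)]

-- ===== VERDICT (by name: the statement is the Claim_ definition above) =====
theorem enumerate_draws_py_spec : Claim_equal_enumerate_draws_py := by
  intro pile k _
  show enumerate_draws_py pile k = enumerate_draws_py_alt pile k
  unfold enumerate_draws_py enumerate_draws_py_alt
  have h := pv_main pile 0 (by omega) [(([] : List Int), k)]
  simp only [Nat.cast_zero] at h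
  rw [h]
  simp
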